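-- pv_equiv track=rewrite | github.com/Ethan136/Python-C-Struct-Converter | src/model/struct_parser.py | _split_member_lines
-- ===== SOURCE A (Python) =====
-- def _split_member_lines(body: str):
--     """Split struct/union body into member lines respecting nested braces."""
--     lines = []
--     current = ""
--     brace = 0
--     for ch in body:
--         if ch == '{':
--             brace += 1
--         elif ch == '}':
--             brace -= 1
--         if ch == ';' and brace == 0:
--             current += ch
--             lines.append(current.strip().rstrip(';').strip())
--             current = ""
--             continue
--         current += ch
--     if current.strip():
--         lines.append(current.strip())
--     return lines
-- ===== SOURCE B (Python) =====
-- def _split_member_lines(body: str):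
--     """Split struct/union body into member lines respecting nested braces.
--
--     Two-pass re-implementation: first record the indices of every depth-0 ';',
--     then slice the body between consecutive cut points.
--     """
--     brace = 0
--     cuts = []
--     for i, ch in enumerate(body):
--         if ch == '{':
--             brace += 1
--         elif ch == '}':
--             brace -= 1
--         elif ch == ';' and brace == 0:
--             cuts.append(i)
--     lines = []
--     prev = 0
--     for i in cuts:
--         lines.append(body[prev:i].strip())
--         prev = i + 1
--     tail = body[prev:].strip()
--     if tail:
--         lines.append(tail)
--     return lines
-- ===== Notes on version B (the rewrite author's own statement) =====
-- stated objective: alternative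
-- what changed: A accumulates each member character-by-character in a growing string buffer during a single scan; B first records the index of every depth-0 semicolon in one pass and then builds the members by slicing the body between consecutive cut points and stripping each slice.
import Mathlib
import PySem

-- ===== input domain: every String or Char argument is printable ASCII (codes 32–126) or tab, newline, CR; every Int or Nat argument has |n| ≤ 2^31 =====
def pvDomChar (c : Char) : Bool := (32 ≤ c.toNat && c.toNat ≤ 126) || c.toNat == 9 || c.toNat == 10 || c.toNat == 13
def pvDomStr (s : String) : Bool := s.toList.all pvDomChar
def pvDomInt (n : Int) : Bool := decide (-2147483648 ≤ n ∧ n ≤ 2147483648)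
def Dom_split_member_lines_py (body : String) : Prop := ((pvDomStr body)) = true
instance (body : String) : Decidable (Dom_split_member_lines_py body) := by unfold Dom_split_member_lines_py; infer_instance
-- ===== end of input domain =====

-- B replaces A's character-by-character accumulator with a two-pass scheme (record the
-- depth-0 ';' indices, then slice between them); objective: alternative decomposition, same cost.

-- ===== PORT A =====
-- Python s.rstrip(';') (PySem has no rstrip-with-chars form): drop trailing ';' chars; exact.
def pyRstripSemi (s : List Char) : List Char := (s.reverse.dropWhile (· == ';')).reverse

-- the for-loop of A: state (lines, current, brace); after the loop the tail flush.
def loopA : List Char → List (List Char) → List Char → Int → List (List Char)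
  | [], lines, cur, _ =>
      if PySem.Chars.strip cur ≠ [] then lines ++ [PySem.Chars.strip cur] else lines
  | c :: rest, lines, cur, br =>
      let br' : Int := if c = '{' then br + 1 else if c = '}' then br - 1 else br
      if c = ';' ∧ br' = 0 then
        loopA rest (lines ++ [PySem.Chars.strip (pyRstripSemi (PySem.Chars.strip (cur ++ [c])))]) [] br'
      else
        loopA rest lines (cur ++ [c]) br'

def split_member_lines_py (body : String) : List String :=
  (loopA body.toList [] [] 0).map String.ofList

-- ===== PORT B =====
-- first pass: absolute indices of every ';' at brace depth 0
def cutsB : List Char → Nat → Int → List Nat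
  | [], _, _ => []
  | c :: rest, i, br =>
      if c = '{' then cutsB rest (i + 1) (br + 1)
      else if c = '}' then cutsB rest (i + 1) (br - 1)
      else if c = ';' ∧ br = 0 then i :: cutsB rest (i + 1) br
      else cutsB rest (i + 1) br

-- second pass: slice body[prev:i] for each cut, then the stripped tail if non-empty
def segsB (cs : List Char) : List Nat → Nat → List (List Char)
  | [], prev =>
      let t := PySem.Chars.strip (cs.drop prev)
      if t ≠ [] then [t] else []
  | j :: bs, prev =>
      PySem.Chars.strip ((cs.drop prev).take (j - prev)) :: segsB cs bs (j + 1)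

def split_member_lines_py_alt (body : String) : List String :=
  (segsB body.toList (cutsB body.toList 0 0) 0).map String.ofList

-- ===== PRECONDITION & SPEC =====
def Spec_split_member_lines_py (body : String) (out : List String) : Prop := out = split_member_lines_py_alt body
instance (body : String) (out : List String) : Decidable (Spec_split_member_lines_py body out) := by unfold Spec_split_member_lines_py; infer_instance

-- ===== CLAIM (what is proved, stated in full; the proofs are below) =====
def Claim_equal_split_member_lines_py : Prop := ∀ (body : String), Dom_split_member_lines_py body → Spec_split_member_lines_py body (split_member_lines_py body)

-- ===== LEMMAS AND PROOFS =====

-- common reference splitter both ports are reduced to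
def splitSpec : List Char → List Char → Int → List (List Char)
  | [], cur, _ =>
      if PySem.Chars.strip cur ≠ [] then [PySem.Chars.strip cur] else []
  | c :: rest, cur, br =>
      let br' : Int := if c = '{' then br + 1 else if c = '}' then br - 1 else br
      if c = ';' ∧ br' = 0 then PySem.Chars.strip cur :: splitSpec rest [] br'
      else splitSpec rest (cur ++ [c]) br'

-- A's loop invariant: the stripped accumulator ends with ';' only while inside braces
def InvA (cur : List Char) (br : Int) : Prop :=
  (PySem.Chars.strip cur).getLast? = some ';' → br ≠ 0


theorem lstrip_append_nonspace (cur : List Char) (c : Char) (hc : PySem.Chars.isspace c = false) :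
    PySem.Chars.lstrip (cur ++ [c]) = PySem.Chars.lstrip cur ++ [c] := by
  simp [PySem.Chars.lstrip, List.dropWhile_append, hc]

theorem rstrip_append_nonspace (x : List Char) (c : Char) (hc : PySem.Chars.isspace c = false) :
    PySem.Chars.rstrip (x ++ [c]) = x ++ [c] := by
  simp [PySem.Chars.rstrip, hc]

theorem strip_append_nonspace (cur : List Char) (c : Char) (hc : PySem.Chars.isspace c = false) :
    PySem.Chars.strip (cur ++ [c]) = PySem.Chars.lstrip cur ++ [c] := by
  simp [PySem.Chars.strip, lstrip_append_nonspace cur c hc, rstrip_append_nonspace _ c hc]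

theorem strip_append_space (cur : List Char) (c : Char) (hc : PySem.Chars.isspace c = true) :
    PySem.Chars.strip (cur ++ [c]) = PySem.Chars.strip cur := by
  by_cases h : PySem.Chars.lstrip cur = []
  · have h' : List.dropWhile PySem.Chars.isspace cur = [] := h
    have h2 : PySem.Chars.lstrip (cur ++ [c]) = [] := by
      unfold PySem.Chars.lstrip
      rw [List.dropWhile_append, h']
      simp [List.dropWhile, hc]
    simp [PySem.Chars.strip, h, h2, PySem.Chars.rstrip]
  · have h' : (List.dropWhile PySem.Chars.isspace cur).isEmpty = false := by
      rw [List.isEmpty_eq_false_iff]; exact h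
    have h2 : PySem.Chars.lstrip (cur ++ [c]) = PySem.Chars.lstrip cur ++ [c] := by
      unfold PySem.Chars.lstrip
      rw [List.dropWhile_append, h']
      simp
    simp [PySem.Chars.strip, h2, PySem.Chars.rstrip, hc]

theorem dropWhile_semi_space (u : List Char) (h : (u.dropWhile PySem.Chars.isspace).head? ≠ some ';') :
    (u.dropWhile (· == ';')).dropWhile PySem.Chars.isspace = u.dropWhile PySem.Chars.isspace := by
  cases u with
  | nil => rfl
  | cons a u' =>
    by_cases ha : a = ';'
    · exfalso
      subst ha
      simp [List.dropWhile, show PySem.Chars.isspace ';' = false from rfl] at h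
    · have hb : (a == ';') = false := by simpa using ha
      simp [List.dropWhile, hb]

theorem lstrip_of_prefix (x y : List Char) (hx : List.dropWhile PySem.Chars.isspace x = x)
    (hpre : y <+: x) : List.dropWhile PySem.Chars.isspace y = y := by
  cases y with
  | nil => rfl
  | cons a y' =>
    obtain ⟨t, ht⟩ := hpre
    have ha : PySem.Chars.isspace a = false := by
      by_contra hp
      have hp' : PySem.Chars.isspace a = true := by simpa using hp
      rw [← ht] at hx
      simp only [List.cons_append] at hx
      rw [List.dropWhile_cons_of_pos hp'] at hx
      have h1 := List.length_dropWhile_le (p := PySem.Chars.isspace) (l := y' ++ t)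
      have h2 : (List.dropWhile PySem.Chars.isspace (y' ++ t)).length = (a :: (y' ++ t)).length :=
        congrArg List.length hx
      simp only [List.length_cons] at h2
      omega
    rw [List.dropWhile_cons_of_neg (by simp [ha])]

theorem flush_eq (cur : List Char) (h : (PySem.Chars.strip cur).getLast? ≠ some ';') :
    PySem.Chars.strip (pyRstripSemi (PySem.Chars.strip (cur ++ [';']))) = PySem.Chars.strip cur := by
  have hs : PySem.Chars.strip (cur ++ [';']) = PySem.Chars.lstrip cur ++ [';'] :=
    strip_append_nonspace cur ';' rfl
  rw [hs]
  set x := PySem.Chars.lstrip cur with hxdef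
  have hsemi : pyRstripSemi (x ++ [';']) = (x.reverse.dropWhile (· == ';')).reverse := by
    simp [pyRstripSemi]
  rw [hsemi]
  set d := x.reverse.dropWhile (· == ';') with hddef
  -- hypothesis in head? form
  have hh : (x.reverse.dropWhile PySem.Chars.isspace).head? ≠ some ';' := by
    intro hcon
    apply h
    simp [PySem.Chars.strip, PySem.Chars.rstrip, ← hxdef, List.getLast?_reverse]
    exact hcon
  have key := dropWhile_semi_space (x.reverse) hh
  -- x is already left-stripped, and d.reverse is a prefix of x
  have hx : List.dropWhile PySem.Chars.isspace x = x := by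
    rw [hxdef]; exact List.dropWhile_idempotent _ _
  have hpre : d.reverse <+: x := by
    have h1 : d <:+ x.reverse := List.dropWhile_suffix _
    have := List.reverse_prefix.mpr h1
    simpa using this
  have hlstrip : PySem.Chars.lstrip d.reverse = d.reverse :=
    lstrip_of_prefix x d.reverse hx hpre
  show PySem.Chars.strip d.reverse = PySem.Chars.strip cur
  rw [PySem.Chars.strip, hlstrip]
  show PySem.Chars.rstrip d.reverse = PySem.Chars.strip cur
  simp only [PySem.Chars.rstrip, List.reverse_reverse, hddef, key]
  simp [PySem.Chars.strip, PySem.Chars.rstrip, ← hxdef]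

-- evaluation lemmas for the branch structure of cutsB / splitSpec
theorem cutsB_open (rest : List Char) (i : Nat) (br : Int) :
    cutsB ('{' :: rest) i br = cutsB rest (i + 1) (br + 1) := by simp [cutsB]

theorem cutsB_close (rest : List Char) (i : Nat) (br : Int) :
    cutsB ('}' :: rest) i br = cutsB rest (i + 1) (br - 1) := by simp [cutsB]

theorem cutsB_semi0 (rest : List Char) (i : Nat) :
    cutsB (';' :: rest) i 0 = i :: cutsB rest (i + 1) 0 := by simp [cutsB]

theorem cutsB_other (c : Char) (rest : List Char) (i : Nat) (br : Int)
    (h1 : c ≠ '{') (h2 : c ≠ '}') (h3 : ¬(c = ';' ∧ br = 0)) :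
    cutsB (c :: rest) i br = cutsB rest (i + 1) br := by
  simp only [cutsB]
  rw [if_neg h1, if_neg h2, if_neg h3]

theorem splitSpec_open (rest cur : List Char) (br : Int) :
    splitSpec ('{' :: rest) cur br = splitSpec rest (cur ++ ['{']) (br + 1) := by simp [splitSpec]

theorem splitSpec_close (rest cur : List Char) (br : Int) :
    splitSpec ('}' :: rest) cur br = splitSpec rest (cur ++ ['}']) (br - 1) := by simp [splitSpec]

theorem splitSpec_semi0 (rest cur : List Char) :
    splitSpec (';' :: rest) cur 0 = PySem.Chars.strip cur :: splitSpec rest [] 0 := by simp [splitSpec]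

theorem splitSpec_semi_ne (rest cur : List Char) (br : Int) (hbr : br ≠ 0) :
    splitSpec (';' :: rest) cur br = splitSpec rest (cur ++ [';']) br := by
  simp only [splitSpec]
  rw [if_neg (by simp [hbr])]
  simp

theorem splitSpec_other (c : Char) (rest cur : List Char) (br : Int)
    (h1 : c ≠ '{') (h2 : c ≠ '}') (h3 : c ≠ ';') :
    splitSpec (c :: rest) cur br = splitSpec rest (cur ++ [c]) br := by
  simp only [splitSpec]
  rw [if_neg (by simp [h3]), if_neg h1, if_neg h2]

-- Invariant preservation along a non-flush step
theorem invA_step (cur : List Char) (br : Int) (c : Char)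
    (hinv : InvA cur br)
    (hnb : ¬ (c = ';' ∧ (if c = '{' then br + 1 else if c = '}' then br - 1 else br) = 0)) :
    InvA (cur ++ [c]) (if c = '{' then br + 1 else if c = '}' then br - 1 else br) := by
  intro hend
  by_cases hsp : PySem.Chars.isspace c = true
  · rw [strip_append_space cur c hsp] at hend
    have hc1 : c ≠ '{' := by intro h; subst h; exact absurd hsp (by decide)
    have hc2 : c ≠ '}' := by intro h; subst h; exact absurd hsp (by decide)
    simpa [hc1, hc2] using hinv hend
  · have hsp' : PySem.Chars.isspace c = false := by simpa using hsp
    rw [strip_append_nonspace cur c hsp'] at hend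
    simp [List.getLast?_append] at hend
    subst hend
    intro hz
    exact hnb ⟨rfl, hz⟩

theorem loopA_eq_spec (rest : List Char) :
    ∀ (lines : List (List Char)) (cur : List Char) (br : Int), InvA cur br →
      loopA rest lines cur br = lines ++ splitSpec rest cur br := by
  induction rest with
  | nil => intro lines cur br _; by_cases h : PySem.Chars.strip cur ≠ [] <;> simp [loopA, splitSpec, h]
  | cons c rest ih =>
    intro lines cur br hinv
    by_cases hb : c = ';' ∧ (if c = '{' then br + 1 else if c = '}' then br - 1 else br) = 0
    · obtain ⟨hc, hz⟩ := hb
      subst hc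
      have hbr : br = 0 := by simpa using hz
      subst hbr
      have hend : (PySem.Chars.strip cur).getLast? ≠ some ';' := by
        intro h; exact hinv h rfl
      have hinv0 : InvA [] 0 := by
        intro h; simp [PySem.Chars.strip, PySem.Chars.lstrip, PySem.Chars.rstrip] at h
      rw [splitSpec_semi0]
      simp only [loopA]
      rw [if_pos (by simp)]
      have hifz : (if (';':Char) = '{' then (0:Int) + 1 else if (';':Char) = '}' then (0:Int) - 1 else 0) = 0 := by
        simp
      rw [hifz, ih (lines ++ [PySem.Chars.strip (pyRstripSemi (PySem.Chars.strip (cur ++ [';'])))]) [] 0 hinv0]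
      rw [flush_eq cur hend]
      simp
    · simp only [loopA, splitSpec, if_neg hb]
      exact ih _ _ _ (invA_step cur br c hinv hb)

-- B's two passes compute the same reference splitter
theorem segsB_eq_spec (cs : List Char) :
    ∀ (rest : List Char) (i prev : Nat) (br : Int), rest = cs.drop i → prev ≤ i →
      segsB cs (cutsB rest i br) prev = splitSpec rest ((cs.drop prev).take (i - prev)) br := by
  intro rest
  induction rest generalizing cs with
  | nil =>
    intro i prev br hdrop hle
    have hlen : cs.length ≤ i := by
      have := congrArg List.length hdrop
      simp at this; omega
    have htk : (cs.drop prev).take (i - prev) = cs.drop prev := by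
      apply List.take_of_length_le; simp; omega
    simp [cutsB, segsB, splitSpec, htk]
  | cons c rest ih =>
    intro i prev br hdrop hle
    have hi : i < cs.length := by
      by_contra h
      simp [List.drop_eq_nil_of_le (by omega : cs.length ≤ i)] at hdrop
    have hrest : rest = cs.drop (i + 1) := by
      have := congrArg (List.drop 1) hdrop
      simpa [List.drop_drop, Nat.add_comm] using this
    have hc : cs[i]? = some c := by
      have h0 : (cs.drop i)[0]? = some c := by rw [← hdrop]; rfl
      simpa using h0
    have htake : (cs.drop prev).take (i + 1 - prev) = (cs.drop prev).take (i - prev) ++ [c] := by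
      have h1 : i + 1 - prev = (i - prev) + 1 := by omega
      rw [h1, List.take_add_one]
      have h2 : (cs.drop prev)[i - prev]? = some c := by
        rw [List.getElem?_drop]
        have h3 : prev + (i - prev) = i := by omega
        rw [h3, hc]
      simp [h2]
    by_cases h1 : c = '{'
    · subst h1
      rw [cutsB_open, splitSpec_open, ih cs (i + 1) prev (br + 1) hrest (by omega), htake]
    · by_cases h2 : c = '}'
      · subst h2
        rw [cutsB_close, splitSpec_close, ih cs (i + 1) prev (br - 1) hrest (by omega), htake]
      · by_cases h3 : c = ';' ∧ br = 0
        · obtain ⟨hc3, hz⟩ := h3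
          subst hc3; subst hz
          rw [cutsB_semi0, splitSpec_semi0]
          simp only [segsB]
          rw [ih cs (i + 1) (i + 1) 0 hrest (le_refl _)]
          simp
        · by_cases h4 : c = ';'
          · subst h4
            have hbr : br ≠ 0 := fun hz => h3 ⟨rfl, hz⟩
            rw [cutsB_other _ _ _ _ (by decide) (by decide) h3,
                splitSpec_semi_ne _ _ _ hbr, ih cs (i + 1) prev br hrest (by omega), htake]
          · rw [cutsB_other _ _ _ _ h1 h2 h3,
                splitSpec_other _ _ _ _ h1 h2 h4, ih cs (i + 1) prev br hrest (by omega), htake]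

-- ===== VERDICT (by name: the statement is the Claim_ definition above) =====
theorem split_member_lines_py_spec : Claim_equal_split_member_lines_py := by
  intro body _
  unfold Spec_split_member_lines_py split_member_lines_py split_member_lines_py_alt
  rw [loopA_eq_spec body.toList [] [] 0 (by intro h; simp [PySem.Chars.strip, PySem.Chars.lstrip, PySem.Chars.rstrip] at h),
      segsB_eq_spec body.toList body.toList 0 0 0 rfl (le_refl 0)]
  simp
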